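-- pv_equiv track=rewrite | github.com/OzanSentrk/page-1 | suggestion.py | categorize_meals
-- ===== SOURCE A (Python) =====
-- def categorize_meals(meals):
--     categorized_meals = {'Breakfast': [], 'Lunch/Snacks': [], 'One Dish Meal': []}
--     for meal in meals:
--         if meal['category'] == 'Breakfast':
--             categorized_meals['Breakfast'].append(meal)
--         elif meal['category'] == 'Lunch/Snacks':
--             categorized_meals['Lunch/Snacks'].append(meal)
--         elif meal['category'] == 'One Dish Meal':
--             categorized_meals['One Dish Meal'].append(meal)
--     return categorized_meals
-- ===== SOURCE B (Python) =====
-- def categorize_meals(meals):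
--     return {cat: [m for m in meals if m['category'] == cat]
--             for cat in ('Breakfast', 'Lunch/Snacks', 'One Dish Meal')}
-- ===== Notes on version B (the rewrite author's own statement) =====
-- stated objective: idiomatic
-- what changed: Replaces the single-pass if/elif loop appending into a pre-built dict by a dict comprehension over the three fixed categories, each value a filtering pass over the meals.
import Mathlib
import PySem

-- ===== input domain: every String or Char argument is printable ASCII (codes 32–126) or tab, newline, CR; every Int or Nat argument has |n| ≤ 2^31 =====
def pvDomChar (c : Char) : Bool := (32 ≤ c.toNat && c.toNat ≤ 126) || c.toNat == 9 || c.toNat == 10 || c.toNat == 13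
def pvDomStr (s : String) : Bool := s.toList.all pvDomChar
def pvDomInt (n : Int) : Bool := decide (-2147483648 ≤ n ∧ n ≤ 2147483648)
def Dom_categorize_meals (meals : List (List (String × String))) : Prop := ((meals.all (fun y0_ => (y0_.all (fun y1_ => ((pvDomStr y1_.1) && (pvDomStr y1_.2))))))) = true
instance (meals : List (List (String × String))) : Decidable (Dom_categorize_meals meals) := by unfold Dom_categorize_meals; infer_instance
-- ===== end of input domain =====

-- B replaces A's single if/elif pass appending into a pre-built 3-key dict by a dict comprehension:
-- one filtering pass per fixed category; same keys, order and per-list order. Objective: idiomatic.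


-- ===== PORT A =====
-- meal['category']: first-match lookup in the association list; the "" default is never
-- consulted under Pre_ (every meal carries the key).
def pvCategory (meal : List (String × String)) : String :=
  (PySem.Dict.mk meal).getD "category" ""

-- the body of A's for-loop (the if/elif chain appending into the dict)
def pvStepA (d : PySem.Dict String (List (List (String × String))))
    (meal : List (String × String)) : PySem.Dict String (List (List (String × String))) :=
  if pvCategory meal == "Breakfast" then d.modify "Breakfast" [] (· ++ [meal])
  else if pvCategory meal == "Lunch/Snacks" then d.modify "Lunch/Snacks" [] (· ++ [meal])
  else if pvCategory meal == "One Dish Meal" then d.modify "One Dish Meal" [] (· ++ [meal])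
  else d

def categorize_meals (meals : List (List (String × String))) : List (String × List (List (String × String))) :=
  (meals.foldl pvStepA
    (PySem.Dict.ofList [("Breakfast", []), ("Lunch/Snacks", []), ("One Dish Meal", [])])).items

-- ===== PORT B =====
def categorize_meals_alt (meals : List (List (String × String))) : List (String × List (List (String × String))) :=
  ["Breakfast", "Lunch/Snacks", "One Dish Meal"].map
    (fun cat => (cat, meals.filter (fun m => pvCategory m == cat)))

-- ===== PRECONDITION & SPEC =====
-- Pre_ excludes meals missing the 'category' key, on which both Pythons raise KeyError.
def Pre_categorize_meals (meals : List (List (String × String))) : Prop :=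
  (meals.all (fun m => m.any (fun p => p.1 == "category"))) = true
instance (meals : List (List (String × String))) : Decidable (Pre_categorize_meals meals) := by unfold Pre_categorize_meals; infer_instance
def pvWitness_categorize_meals : (List (List (String × String))) :=
  [[("category", "Breakfast"), ("name", "omelet")], [("category", "Dessert")]]

def Spec_categorize_meals (meals : List (List (String × String))) (out : List (String × List (List (String × String)))) : Prop := out = categorize_meals_alt meals
instance (meals : List (List (String × String))) (out : List (String × List (List (String × String)))) : Decidable (Spec_categorize_meals meals out) := by unfold Spec_categorize_meals; infer_instance

-- ===== CLAIM (what is proved, stated in full; the proofs are below) =====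
def Claim_equal_categorize_meals : Prop := ∀ (meals : List (List (String × String))), Dom_categorize_meals meals → Pre_categorize_meals meals → Spec_categorize_meals meals (categorize_meals meals)

-- ===== LEMMAS AND PROOFS =====

-- loop invariant: A's fold over a 3-key dict with lists b, l, o already accumulated
lemma pvFoldA_items (meals : List (List (String × String)))
    (b l o : List (List (String × String))) :
    (meals.foldl pvStepA
      (PySem.Dict.mk [("Breakfast", b), ("Lunch/Snacks", l), ("One Dish Meal", o)])).items
    = [("Breakfast", b ++ meals.filter (fun m => pvCategory m == "Breakfast")),
       ("Lunch/Snacks", l ++ meals.filter (fun m => pvCategory m == "Lunch/Snacks")),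
       ("One Dish Meal", o ++ meals.filter (fun m => pvCategory m == "One Dish Meal"))] := by
  induction meals generalizing b l o with
  | nil => simp
  | cons m rest ih =>
    simp only [List.foldl_cons, List.filter_cons]
    by_cases h1 : pvCategory m = "Breakfast"
    · simp [pvStepA, h1, PySem.Dict.modify, PySem.Dict.insert, PySem.Dict.getD,
        PySem.Dict.get?, PySem.Dict.contains, ih]
    · by_cases h2 : pvCategory m = "Lunch/Snacks"
      · simp [pvStepA, h2, PySem.Dict.modify, PySem.Dict.insert, PySem.Dict.getD,
          PySem.Dict.get?, PySem.Dict.contains, ih]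
      · by_cases h3 : pvCategory m = "One Dish Meal"
        · simp [pvStepA, h3, PySem.Dict.modify, PySem.Dict.insert, PySem.Dict.getD,
            PySem.Dict.get?, PySem.Dict.contains, ih]
        · simp [pvStepA, h1, h2, h3, ih]

-- ===== VERDICT (by name: the statement is the Claim_ definition above) =====
theorem categorize_meals_spec : Claim_equal_categorize_meals := by
  intro meals _ _
  show categorize_meals meals = categorize_meals_alt meals
  have h0 : (PySem.Dict.ofList [("Breakfast", ([] : List (List (String × String)))),
      ("Lunch/Snacks", []), ("One Dish Meal", [])])
      = PySem.Dict.mk [("Breakfast", []), ("Lunch/Snacks", []), ("One Dish Meal", [])] := by decide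
  simp [categorize_meals, categorize_meals_alt, h0, pvFoldA_items]
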